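-- pv_equiv track=rewrite | github.com/miliar/Code_Jam_Webscraper | solutions_python/solutions_year09_round0_nr1/235.py | gen_words
-- ===== SOURCE A (Python) =====
-- import bisect
--
-- def check_partial(word, words):
--   ind = bisect.bisect_left(words, word)
--   return ind != len(words) and words[ind][:len(word)] == word
--
-- def gen_words(word, all_words):
--   def _gen_words(i, cur, words):
--     if i >= len(word):
--       words.append(cur)
--       return
--     if word[i] != '(':
--       nw = cur + word[i]
--       if check_partial(nw, all_words):
--         _gen_words(i+1, nw, words)
--       return
--     i += 1
--     paren = word.find(')', i)
--     assert paren != -1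
--     while i < paren:
--       nw = cur + word[i]
--       if not check_partial(nw, all_words):
--         i += 1
--         continue
--       _gen_words(paren+1, nw, words)
--       i += 1
--   words = []
--   _gen_words(0, '', words)
--   return words
-- ===== SOURCE B (Python) =====
-- import bisect
--
-- def check_partial(word, words):
--     ind = bisect.bisect_left(words, word)
--     return ind != len(words) and words[ind][:len(word)] == word
--
-- def gen_words(word, all_words):
--     # Parse first, enumerate second: tokenize the pattern once into a list of
--     # choice segments (a plain char, or the characters of a '(...)' group), then
--     # expand them by a pure structural recursion that concatenates completions,
--     # instead of index-threaded recursion mutating an accumulator.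
--     segs = []
--     i = 0
--     while i < len(word):
--         if word[i] != '(':
--             segs.append(word[i])
--             i += 1
--         else:
--             j = word.index(')', i + 1)
--             segs.append(word[i + 1:j])
--             i = j + 1
--
--     def expand(d, cur):
--         if d == len(segs):
--             return [cur]
--         return [r for ch in segs[d] if check_partial(cur + ch, all_words)
--                   for r in expand(d + 1, cur + ch)]
--
--     return expand(0, '')
-- ===== Notes on version B (the rewrite author's own statement) =====
-- stated objective: alternative
-- what changed: B separates parsing from enumeration: it tokenizes the pattern once into a list of choice segments and then expands them by a pure structural recursion that concatenates completion lists, instead of A's index-threaded recursion with word.find and a while-loop mutating a shared accumulator.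
-- outside the precondition, e.g. on gen_words('a(', ['b']): A returns [], B raises ValueError
import Mathlib
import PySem

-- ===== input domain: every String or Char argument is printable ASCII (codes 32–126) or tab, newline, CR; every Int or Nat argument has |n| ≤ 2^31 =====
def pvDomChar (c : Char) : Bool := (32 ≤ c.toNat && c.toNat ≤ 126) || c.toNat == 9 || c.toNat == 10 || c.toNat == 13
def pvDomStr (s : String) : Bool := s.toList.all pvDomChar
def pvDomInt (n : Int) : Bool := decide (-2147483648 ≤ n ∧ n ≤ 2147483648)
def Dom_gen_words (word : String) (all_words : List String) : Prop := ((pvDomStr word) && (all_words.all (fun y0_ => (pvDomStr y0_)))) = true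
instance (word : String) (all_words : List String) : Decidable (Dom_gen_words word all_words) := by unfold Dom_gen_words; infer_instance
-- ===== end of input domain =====

-- B separates parsing from enumeration: it tokenizes the pattern once into choice
-- segments, then expands them by a pure structural recursion that concatenates
-- completion lists, instead of A's index-threaded recursion mutating an accumulator
-- (objective: alternative).


-- ===== PORT A =====
-- check_partial: bisect_left, then compare words[ind][:len(word)] with word
-- (the slice [:len(word)] with a nonnegative bound is List.take; ind ≤ ws.length always,
-- so getD's default is never read on the branch where it is used).
def pvCheckPartial (w : List Char) (ws : List (List Char)) : Bool :=
  let ind := PySem.List.bisectLeft ws w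
  if ind = ws.length then false
  else (ws.getD ind []).take w.length == w

-- _gen_words: the inner recursion; the while-loop over the characters of a '(…)' group is
-- pvGenLoopA.  word.find(')', i+1) is ported by hand as idxOf? on the dropped list
-- (exact: start i+1 ≥ 0; past-the-end drop gives [], i.e. Python's -1 = none);
-- the `none` branch is Python's failing `assert` (AssertionError), excluded by Pre_.
mutual
def pvGenAuxA (w : List Char) (aw : List (List Char)) (i : Nat) (cur : List Char)
    (words : List (List Char)) : List (List Char) :=
  if h : w.length ≤ i then words ++ [cur]
  else
    let c := w.getD i default
    if c ≠ '(' then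
      let nw := cur ++ [c]
      if pvCheckPartial nw aw then pvGenAuxA w aw (i + 1) nw words else words
    else
      match hk : List.idxOf? ')' (w.drop (i + 1)) with
      | none => words          -- Python: assert fails here; outside Pre_
      | some k => pvGenLoopA w aw (i + 1) (i + 1 + k) cur words
  termination_by (w.length - i, 0, 0)
  decreasing_by
  · exact Prod.Lex.left _ _ (by omega)
  · obtain ⟨hlt, -, -⟩ := List.idxOf?_eq_some_iff.mp hk
    simp only [List.length_drop] at hlt
    exact Prod.Lex.left _ _ (by omega)
def pvGenLoopA (w : List Char) (aw : List (List Char)) (j paren : Nat) (cur : List Char)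
    (words : List (List Char)) : List (List Char) :=
  if hj : j < paren then
    let nw := cur ++ [w.getD j default]
    if pvCheckPartial nw aw then
      pvGenLoopA w aw (j + 1) paren cur (pvGenAuxA w aw (paren + 1) nw words)
    else
      pvGenLoopA w aw (j + 1) paren cur words
  else words
  termination_by (w.length - (paren + 1), 1, paren + 1 - j)
  decreasing_by
  · exact Prod.Lex.right _ (Prod.Lex.left _ _ (by omega))
  · exact Prod.Lex.right _ (Prod.Lex.right _ (by omega))
  · exact Prod.Lex.right _ (Prod.Lex.right _ (by omega))
end

def gen_words (word : String) (all_words : List String) : List String :=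
  (pvGenAuxA word.toList (all_words.map String.toList) 0 [] []).map String.mk

-- ===== PORT B =====
-- Source B's tokenizer: the while-loop over i collecting choice segments; word.index(')', i+1)
-- is the same hand-port of the scan as in A (exact: start i+1 ≥ 0; past-the-end drop gives
-- [], i.e. none = Python's ValueError, which is outside Pre_).
def pvTokB (w : List Char) (i : Nat) : List (List Char) :=
  if h : w.length ≤ i then []
  else if w.getD i default ≠ '(' then [w.getD i default] :: pvTokB w (i + 1)
  else
    match hk : List.idxOf? ')' (w.drop (i + 1)) with
    | none => []             -- Python: ValueError from word.index; outside Pre_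
    | some k => ((w.drop (i + 1)).take k) :: pvTokB w (i + 1 + k + 1)
termination_by w.length - i
decreasing_by
  · omega
  · obtain ⟨hlt, -, -⟩ := List.idxOf?_eq_some_iff.mp hk
    simp only [List.length_drop] at hlt
    omega

-- Source B's expand: `if d == len(segs)` / recursion on d becomes structural recursion on the
-- remaining segment list; the nested list comprehension is the flatMap with the filter.
def pvExpandB (aw : List (List Char)) : List (List Char) → List Char → List (List Char)
  | [], cur => [cur]
  | seg :: rest, cur =>
    seg.flatMap (fun ch =>
      if pvCheckPartial (cur ++ [ch]) aw then pvExpandB aw rest (cur ++ [ch]) else [])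

def gen_words_alt (word : String) (all_words : List String) : List String :=
  (pvExpandB (all_words.map String.toList) (pvTokB word.toList 0) []).map String.mk

-- ===== PRECONDITION & SPEC =====
-- state machine: scanning left to right, a '(' opens a group, the first ')' closes it;
-- the pattern is well formed iff no group is left open at the end.
def pvParenScan : List Char → Bool → Bool
  | [], inGroup => !inGroup
  | c :: rest, false => pvParenScan rest (c = '(')
  | c :: rest, true => pvParenScan rest (c ≠ ')')

def pvParenOK (cs : List Char) : Bool := pvParenScan cs false

-- Pre_ excludes the patterns with a group-opening '(' that has no closing ')': A's assert
-- fails (AssertionError) whenever such a '(' is reached, while B's up-front tokenizer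
-- always raises ValueError there; on the words where pruning stops before the bad '(' A
-- still returns the partial results (the syntactic Pre_ excludes those too).
def Pre_gen_words (word : String) (all_words : List String) : Prop :=
  pvParenOK word.toList = true
instance (word : String) (all_words : List String) : Decidable (Pre_gen_words word all_words) := by
  unfold Pre_gen_words; infer_instance

def pvWitness_gen_words : String × List String := ("a(bc)", ["ab", "ac"])

def Spec_gen_words (word : String) (all_words : List String) (out : List String) : Prop := out = gen_words_alt word all_words
instance (word : String) (all_words : List String) (out : List String) : Decidable (Spec_gen_words word all_words out) := by unfold Spec_gen_words; infer_instance

-- ===== CLAIM (what is proved, stated in full; the proofs are below) =====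
def Claim_equal_gen_words : Prop := ∀ (word : String) (all_words : List String), Dom_gen_words word all_words → Pre_gen_words word all_words → Spec_gen_words word all_words (gen_words word all_words)

-- ===== LEMMAS AND PROOFS =====

theorem pvScan_noClose : ∀ (l : List Char), List.idxOf? ')' l = none → pvParenScan l true = false := by
  intro l
  induction l with
  | nil => intro _; rfl
  | cons c rest ih =>
    intro hn
    rw [List.idxOf?_cons] at hn
    by_cases hc : c = ')'
    · simp [hc] at hn
    · have hb : (c == ')') = false := by simp [hc]
      rw [hb] at hn
      simp only [Bool.false_eq_true, if_false, Option.map_eq_none_iff] at hn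
      rw [pvParenScan, show (decide (c ≠ ')')) = true by simp [hc]]
      exact ih hn

theorem pvScan_group : ∀ (l : List Char) (k : Nat), List.idxOf? ')' l = some k →
    pvParenScan l true = pvParenScan (l.drop (k + 1)) false := by
  intro l
  induction l with
  | nil => intro k hk; rw [List.idxOf?_nil] at hk; cases hk
  | cons c rest ih =>
    intro k hk
    rw [List.idxOf?_cons] at hk
    by_cases hc : c = ')'
    · have hb : (c == ')') = true := by simp [hc]
      rw [hb] at hk
      simp only [if_pos rfl] at hk
      injection hk with hk'
      subst hk'
      rw [pvParenScan, show (decide (c ≠ ')')) = false by simp [hc]]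
      simp
    · have hb : (c == ')') = false := by simp [hc]
      rw [hb] at hk
      simp only [Bool.false_eq_true, if_false] at hk
      obtain ⟨k', hk', rfl⟩ := Option.map_eq_some_iff.mp hk
      rw [pvParenScan, show (decide (c ≠ ')')) = true by simp [hc]]
      rw [ih k' hk']
      simp [List.drop_succ_cons]

-- the scan from position i, one step at a time
theorem pvScanFrom_step (w : List Char) (i : Nat) (hi : i < w.length)
    (hne : w.getD i default ≠ '(')
    (hok : pvParenScan (w.drop i) false = true) :
    pvParenScan (w.drop (i + 1)) false = true := by
  rw [List.drop_eq_getElem_cons hi, pvParenScan] at hok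
  rwa [show (decide (w[i] = '(')) = false by
    rw [List.getD_eq_getElem w default hi] at hne
    simp [hne]] at hok

theorem pvScanFrom_open (w : List Char) (i : Nat) (hi : i < w.length)
    (heq : w.getD i default = '(')
    (hok : pvParenScan (w.drop i) false = true) :
    pvParenScan (w.drop (i + 1)) true = true := by
  rw [List.drop_eq_getElem_cons hi, pvParenScan] at hok
  rwa [show (decide (w[i] = '(')) = true by
    rw [List.getD_eq_getElem w default hi] at heq
    simp [heq]] at hok

theorem pvMain (w : List Char) (aw : List (List Char)) :
    ∀ (i : Nat) (cur : List Char) (words : List (List Char)),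
      pvParenScan (w.drop i) false = true →
      pvGenAuxA w aw i cur words = words ++ pvExpandB aw (pvTokB w i) cur := by
  intro i0 cur0 words0 hok0
  refine pvGenAuxA.induct w aw
    (fun i cur words => pvParenScan (w.drop i) false = true →
      pvGenAuxA w aw i cur words = words ++ pvExpandB aw (pvTokB w i) cur)
    (fun j paren cur words => paren ≤ w.length →
      pvParenScan (w.drop (paren + 1)) false = true →
      pvGenLoopA w aw j paren cur words =
        words ++ ((w.drop j).take (paren - j)).flatMap (fun ch =>
          if pvCheckPartial (cur ++ [ch]) aw then pvExpandB aw (pvTokB w (paren + 1)) (cur ++ [ch])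
          else []))
    ?_ ?_ ?_ ?_ ?_ ?_ ?_ ?_ i0 cur0 words0 hok0
  · -- i ≥ len: A appends cur; B expands the empty segment list
    intro i cur words h _
    rw [pvGenAuxA.eq_def, pvTokB.eq_def]
    simp only [dif_pos h]
    rfl
  · -- plain char, check true
    intro i cur words h c hc nw hchk ih hok
    have hc' : (w.getD i default ≠ '(') := hc
    have hchk' : pvCheckPartial (cur ++ [w.getD i default]) aw = true := hchk
    rw [pvGenAuxA.eq_def, pvTokB.eq_def]
    simp only [dif_neg h, if_pos hc', pvExpandB, List.flatMap_cons, List.flatMap_nil,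
      List.append_nil, hchk', if_pos rfl]
    exact ih (pvScanFrom_step w i (by omega) hc' hok)
  · -- plain char, check false: A keeps the accumulator; B contributes nothing
    intro i cur words h c hc nw hchk hok
    have hc' : (w.getD i default ≠ '(') := hc
    have hchk' : ¬ pvCheckPartial (cur ++ [w.getD i default]) aw = true := hchk
    rw [pvGenAuxA.eq_def, pvTokB.eq_def]
    simp only [dif_neg h, if_pos hc', pvExpandB, List.flatMap_cons, List.flatMap_nil,
      List.append_nil, if_neg hchk']
  · -- '(' without ')': impossible inside Pre_
    intro i cur words h c hc hnone hok
    have hc' : w.getD i default = '(' := by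
      by_contra hx; exact hc hx
    have := pvScanFrom_open w i (by omega) hc' hok
    rw [pvScan_noClose _ hnone] at this
    cases this
  · -- '(' with ')': hand over to the loop
    intro i cur words h c hc k hk ih hok
    have hc' : w.getD i default = '(' := by
      by_contra hx; exact hc hx
    have hkl : k < w.length - (i + 1) := by
      obtain ⟨hlt, -, -⟩ := List.idxOf?_eq_some_iff.mp hk
      simpa using hlt
    have hok1 : pvParenScan (w.drop (i + 1 + k + 1)) false = true := by
      have h2 := pvScanFrom_open w i (by omega) hc' hok
      rw [pvScan_group _ k hk] at h2
      rw [List.drop_drop] at h2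
      rwa [show i + 1 + (k + 1) = i + 1 + k + 1 by omega] at h2
    rw [pvGenAuxA.eq_def, pvTokB.eq_def]
    simp only [dif_neg h, if_neg (show ¬ (w.getD i default ≠ '(') from fun hx => hx hc')]
    split
    · next heq => simp [hk] at heq
    · next k' heq =>
      rw [hk] at heq
      injection heq with heq'
      subst heq'
      have hmot := ih (by omega) hok1
      have hsub : i + 1 + k - (i + 1) = k := by omega
      rw [hsub] at hmot
      rw [hmot, pvExpandB]
  · -- loop, check true
    intro j paren cur words hj nw hchk ih1 ih1' ih2 hple hok
    have hchk' : pvCheckPartial (cur ++ [w.getD j default]) aw = true := hchk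
    rw [pvGenLoopA.eq_def]
    simp only [dif_pos hj, hchk', if_pos rfl]
    have hjl : j < w.length := by omega
    have hcons : (w.drop j).take (paren - j) =
        w.getD j default :: (w.drop (j + 1)).take (paren - (j + 1)) := by
      rw [List.getD_eq_getElem w default hjl, List.drop_eq_getElem_cons hjl]
      have h1 : paren - j = (paren - (j + 1)) + 1 := by omega
      rw [h1, List.take_succ_cons]
    rw [hcons, List.flatMap_cons, if_pos hchk', ih2 hple hok, ih1' hok,
      List.append_assoc]
    exact if_pos trivial
  · -- loop, check false
    intro j paren cur words hj nw hchk ih2 hple hok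
    have hchk' : ¬ pvCheckPartial (cur ++ [w.getD j default]) aw = true := hchk
    rw [pvGenLoopA.eq_def]
    simp only [dif_pos hj]
    rw [if_neg hchk']
    have hjl : j < w.length := by omega
    have hcons : (w.drop j).take (paren - j) =
        w.getD j default :: (w.drop (j + 1)).take (paren - (j + 1)) := by
      rw [List.getD_eq_getElem w default hjl, List.drop_eq_getElem_cons hjl]
      have h1 : paren - j = (paren - (j + 1)) + 1 := by omega
      rw [h1, List.take_succ_cons]
    rw [hcons, List.flatMap_cons, if_neg hchk', ih2 hple hok, List.nil_append]
  · -- loop done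
    intro j paren cur words hj hple hok
    rw [pvGenLoopA.eq_def]
    simp only [dif_neg hj]
    have h0 : paren - j = 0 := by omega
    rw [h0]
    simp

-- ===== VERDICT (by name: the statement is the Claim_ definition above) =====
theorem gen_words_spec : Claim_equal_gen_words := by
  intro word all_words _ hpre
  unfold Spec_gen_words gen_words gen_words_alt
  rw [pvMain word.toList (all_words.map String.toList) 0 [] []
    (by simpa [pvParenOK] using hpre)]
  rfl
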